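-- pv_equiv track=rewrite | github.com/MouinulIslamNJIT/IRV_Fairness | Utils.py | finAllSignature
-- ===== SOURCE A (Python) =====
-- def finAllSignature(pi):
--     pi = list(pi)
--     pi.reverse()
--     allSig = []
--     for i in range(0,len(pi)):
--         c = pi[i]
--         newSig = []
--         for s in allSig:
--             sl = list(s)
--             sl.insert(0,c)
--             newSig.append(tuple(sl))
--         allSig.extend(newSig)
--         allSig.append(tuple([c]))
--     return allSig
-- ===== SOURCE B (Python) =====
-- def finAllSignature(pi):
--     pi = list(pi)
--     pi.reverse()
--     def build(elems):
--         if not elems: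
--             return []
--         T = build(elems[:-1])
--         c = elems[-1]
--         return T + [(c,) + s for s in T] + [(c,)]
--     return build(pi)
-- ===== Notes on version B (the rewrite author's own statement) =====
-- stated objective: alternative
-- what changed: Replaces A's accumulating loop (mutating allSig in place per element) by a linear recursion on the prefix of the reversed list that rebuilds the same extension S_prev ++ prepend(c,S_prev) ++ [(c,)] at each step; same exponential output, same order.
import Mathlib
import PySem

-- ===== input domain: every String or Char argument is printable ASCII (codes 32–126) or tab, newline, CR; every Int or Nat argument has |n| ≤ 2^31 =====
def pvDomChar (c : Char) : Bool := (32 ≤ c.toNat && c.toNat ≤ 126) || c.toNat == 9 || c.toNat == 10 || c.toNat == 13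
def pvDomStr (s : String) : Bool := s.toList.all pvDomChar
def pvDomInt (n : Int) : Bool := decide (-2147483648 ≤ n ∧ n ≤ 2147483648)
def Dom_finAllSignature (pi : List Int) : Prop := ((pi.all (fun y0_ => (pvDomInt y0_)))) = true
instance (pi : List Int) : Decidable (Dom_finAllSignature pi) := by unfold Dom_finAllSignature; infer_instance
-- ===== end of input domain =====

-- B replaces A's accumulating loop by a linear recursion on the prefix of the reversed list (same output, same order).

-- ===== PORT A =====
-- A: reverse pi, then for each element c extend allSig with (c prepended to each s) and then [c].
def finAllSignature (pi : List Int) : List (List Int) :=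
  (pi.reverse).foldl
    (fun allSig c => allSig ++ allSig.map (fun s => c :: s) ++ [[c]]) []

-- ===== PORT B =====
-- B's helper build: recursion on elems[:-1] (dropLast), combining with the last element.
def pvBuild (elems : List Int) : List (List Int) :=
  if h : elems = [] then []
  else
    let T := pvBuild elems.dropLast
    let c := elems.getLast h
    T ++ T.map (fun s => c :: s) ++ [[c]]
termination_by elems.length
decreasing_by
  simp [List.length_dropLast]
  exact List.length_pos_iff.mpr h

def finAllSignature_alt (pi : List Int) : List (List Int) :=
  pvBuild pi.reverse

-- ===== PRECONDITION & SPEC =====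
def Spec_finAllSignature (pi : List Int) (out : List (List Int)) : Prop := out = finAllSignature_alt pi
instance (pi : List Int) (out : List (List Int)) : Decidable (Spec_finAllSignature pi out) := by unfold Spec_finAllSignature; infer_instance

-- ===== CLAIM (what is proved, stated in full; the proofs are below) =====
def Claim_equal_finAllSignature : Prop := ∀ (pi : List Int), Dom_finAllSignature pi → Spec_finAllSignature pi (finAllSignature pi)

-- ===== LEMMAS AND PROOFS =====
theorem pvBuild_eq_foldl (l : List Int) :
    pvBuild l = l.foldl (fun allSig c => allSig ++ allSig.map (fun s => c :: s) ++ [[c]]) [] := by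
  induction l using List.reverseRecOn with
  | nil => unfold pvBuild; rfl
  | append_singleton xs c ih =>
      unfold pvBuild
      rw [List.foldl_append, ← ih]; simp

-- ===== VERDICT (by name: the statement is the Claim_ definition above) =====
theorem finAllSignature_spec : Claim_equal_finAllSignature := by
  intro pi _
  unfold Spec_finAllSignature finAllSignature finAllSignature_alt
  rw [pvBuild_eq_foldl]
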